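-- pv_equiv track=rewrite | github.com/zoongahn/problem-solving-BOJ | Level7/num_2775.py | cal_resident_num
-- ===== SOURCE A (Python) =====
-- def cal_resident_num(k, n):
--     num_list = [x+1 for x in range(n)]      # 0층 초기화
--     for i in range(k):      # i+1 층
--         sum = 0
--         for j in range(len(num_list)):      # j+1호
--             sum += num_list[j]
--             num_list[j] = sum
--     return num_list[n-1]
-- ===== SOURCE B (Python) =====
-- def cal_resident_num(k, n):
--     # Closed form: k rounds of prefix sums over [1..n] give C(n+k, k+1)
--     # at position n-1; compute it with the multiplicative binomial formula.
--     kk = k if k > 0 else 0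
--     r = kk + 1
--     m = n + kk
--     c = 1
--     for i in range(r):
--         c = c * (m - i) // (i + 1)
--     return c
-- ===== Notes on version B (the rewrite author's own statement) =====
-- stated objective: faster
-- what changed: Replaces k rounds of in-place prefix sums over an n-element list by the closed-form binomial coefficient C(n+k, k+1) computed with the multiplicative formula in k+1 exact-division steps.
import Mathlib
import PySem

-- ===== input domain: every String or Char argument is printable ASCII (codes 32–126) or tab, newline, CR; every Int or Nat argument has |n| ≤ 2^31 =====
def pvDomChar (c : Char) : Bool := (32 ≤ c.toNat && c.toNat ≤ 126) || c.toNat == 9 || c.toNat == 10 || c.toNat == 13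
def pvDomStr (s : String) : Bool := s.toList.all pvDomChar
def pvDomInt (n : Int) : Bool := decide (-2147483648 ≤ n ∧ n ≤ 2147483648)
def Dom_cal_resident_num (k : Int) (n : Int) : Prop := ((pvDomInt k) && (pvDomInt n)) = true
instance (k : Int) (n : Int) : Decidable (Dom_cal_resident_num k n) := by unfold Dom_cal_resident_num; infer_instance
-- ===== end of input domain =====

-- B replaces A's k rounds of prefix sums (O(k*n)) by the closed-form binomial
-- coefficient C(n+k, k+1) computed multiplicatively in k+1 steps (faster, asymptotic).

-- ===== PORT A =====
-- inner loop 'sum += num_list[j]; num_list[j] = sum': walking the list left to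
-- right, each cell is overwritten by the running sum — rendered as the structural
-- left-to-right rebuild with the same running-sum accumulator (Python's index
-- write is O(1); a cons-list index write is not, the traversal is identical)
def pvInnerA (sum : Int) : List Int → List Int
  | [] => []
  | x :: rest => (sum + x) :: pvInnerA (sum + x) rest

def cal_resident_num (k : Int) (n : Int) : Int :=
  -- num_list = [x+1 for x in range(n)]; k times the inner loop; return num_list[n-1]
  (PySem.List.pyGet?
    ((PySem.List.pyRange 0 k 1).foldl (fun l _ => pvInnerA 0 l)
      ((PySem.List.pyRange 0 n 1).map (fun x => x + 1)))
    (n - 1)).getD 0   -- none = IndexError (n ≤ 0), excluded by Pre_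

-- ===== PORT B =====
def cal_resident_num_alt (k : Int) (n : Int) : Int :=
  let kk : Int := if k > 0 then k else 0
  let r : Int := kk + 1
  let m : Int := n + kk
  (PySem.List.pyRange 0 r 1).foldl (fun c i => PySem.Int.floordiv (c * (m - i)) (i + 1)) 1

-- ===== PRECONDITION & SPEC =====
-- A indexes num_list[n-1] into a list of length max(n,0): IndexError for n ≤ 0.
def Pre_cal_resident_num (k : Int) (n : Int) : Prop := 1 ≤ n
instance (k : Int) (n : Int) : Decidable (Pre_cal_resident_num k n) := by unfold Pre_cal_resident_num; infer_instance
def pvWitness_cal_resident_num : Int × Int := (3, 5)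

def Spec_cal_resident_num (k : Int) (n : Int) (out : Int) : Prop := out = cal_resident_num_alt k n
instance (k : Int) (n : Int) (out : Int) : Decidable (Spec_cal_resident_num k n out) := by unfold Spec_cal_resident_num; infer_instance

-- ===== CLAIM (what is proved, stated in full; the proofs are below) =====
def Claim_equal_cal_resident_num : Prop := ∀ (k : Int) (n : Int), Dom_cal_resident_num k n → Pre_cal_resident_num k n → Spec_cal_resident_num k n (cal_resident_num k n)

-- ===== LEMMAS AND PROOFS =====

-- the inner pass produces the partial sums
theorem pvInnerA_eq_map (l : List Int) (acc : Int) :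
    pvInnerA acc l = (List.range l.length).map (fun j => acc + ((l.take (j + 1)).sum)) := by
  induction l generalizing acc with
  | nil => rfl
  | cons x xs ih =>
    simp only [pvInnerA, List.length_cons, List.range_succ_eq_map, List.map_cons, List.map_map]
    refine List.cons_eq_cons.mpr ⟨by simp, ?_⟩
    rw [ih (acc + x)]
    apply List.map_congr_left
    intro j hj
    simp only [Function.comp_apply, List.take_succ_cons, List.sum_cons]
    ring

-- hockey stick
theorem pvHockey (c : Nat) : ∀ m : Nat,
    (∑ t ∈ Finset.range m, Nat.choose (t + c) c) = Nat.choose (m + c) (c + 1) := by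
  intro m
  induction m with
  | zero => simp
  | succ m ih =>
    rw [Finset.sum_range_succ, ih]
    have : m + 1 + c = (m + c) + 1 := by omega
    rw [this, Nat.choose_succ_succ' (m + c) c]
    omega

-- the model row after i rounds
def pvRow (N i : Nat) : List Int :=
  (List.range N).map (fun j => ((Nat.choose (j + i + 1) (i + 1) : Nat) : Int))

theorem pvListSum (f : Nat → Int) : ∀ n, ((List.range n).map f).sum = ∑ t ∈ Finset.range n, f t := by
  intro n
  induction n with
  | zero => simp
  | succ n ih =>
    rw [List.range_succ, List.map_append, List.sum_append, Finset.sum_range_succ, ih]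
    simp

theorem pvInnerA_row (N i : Nat) : pvInnerA 0 (pvRow N i) = pvRow N (i + 1) := by
  unfold pvRow
  rw [pvInnerA_eq_map]
  simp only [List.length_map, List.length_range]
  apply List.map_congr_left
  intro j hj
  simp only [List.mem_range] at hj
  rw [← List.map_take, List.take_range, Nat.min_eq_left (by omega), zero_add]
  rw [pvListSum (fun t => ((Nat.choose (t + i + 1) (i + 1) : Nat) : Int)) (j + 1)]
  rw [← Nat.cast_sum]
  have h2 : (∑ t ∈ Finset.range (j + 1), Nat.choose (t + i + 1) (i + 1))
      = Nat.choose (j + (i + 1) + 1) (i + 1 + 1) := by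
    rw [show (∑ t ∈ Finset.range (j + 1), Nat.choose (t + i + 1) (i + 1))
        = ∑ t ∈ Finset.range (j + 1), Nat.choose (t + (i + 1)) (i + 1) from
      Finset.sum_congr rfl (fun t _ => by rw [Nat.add_assoc])]
    rw [pvHockey (i + 1) (j + 1)]
    congr 1
    omega
  rw [h2]

theorem pvRow_length (N i : Nat) : (pvRow N i).length = N := by simp [pvRow]

theorem pvFoldl_const {α β : Type} (f : α → α) (init : α) (xs : List β) :
    xs.foldl (fun a _ => f a) init = f^[xs.length] init := by
  induction xs generalizing init with
  | nil => rfl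
  | cons x xs ih => simp [List.foldl_cons, ih, Function.iterate_succ_apply]

theorem pvIterate_inner (N : Nat) : ∀ K : Nat, (pvInnerA 0)^[K] (pvRow N 0) = pvRow N K := by
  intro K
  induction K with
  | zero => rfl
  | succ K ih =>
    rw [Function.iterate_succ_apply', ih, pvInnerA_row]

-- B's multiplicative loop computes the binomial coefficient
theorem pvMulLoop (m : Nat) : ∀ r : Nat, r ≤ m →
    (PySem.List.pyRange 0 (r : Int) 1).foldl
      (fun c i => PySem.Int.floordiv (c * ((m : Int) - i)) (i + 1)) 1
    = ((Nat.choose m r : Nat) : Int) := by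
  intro r hr
  induction r with
  | zero => simp [PySem.List.pyRange_one_eq_nil]
  | succ r ih =>
    have hr' : r ≤ m := by omega
    rw [show ((r + 1 : Nat) : Int) = ((r : Int) + 1) by push_cast; ring]
    rw [PySem.List.pyRange_one_succ_right (by positivity), List.foldl_append, ih hr']
    simp only [List.foldl_cons, List.foldl_nil]
    have hsub : (m : Int) - (r : Int) = (((m - r : Nat) : Nat) : Int) := by
      omega
    rw [hsub, show ((r : Int) + 1) = (((r + 1 : Nat) : Nat) : Int) by push_cast; ring,
        ← Nat.cast_mul, PySem.Int.floordiv_natCast]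
    congr 1
    have key : Nat.choose m (r + 1) * (r + 1) = Nat.choose m r * (m - r) :=
      Nat.choose_succ_right_eq m r
    rw [← key, Nat.mul_div_cancel _ (by omega)]

-- ===== VERDICT (by name: the statement is the Claim_ definition above) =====
theorem cal_resident_num_spec : Claim_equal_cal_resident_num := by
  intro k n _ hn
  unfold Spec_cal_resident_num cal_resident_num cal_resident_num_alt
  dsimp only
  have hn1 : (1 : Int) ≤ n := hn
  set N : Nat := n.toNat with hN
  set K : Nat := k.toNat with hK
  have hnN : n = (N : Int) := by omega
  have hN1 : 1 ≤ N := by omega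
  have hkk : (if k > 0 then k else 0) = (K : Int) := by
    split_ifs with h <;> omega
  -- A's initial list is the model row 0
  have hinit : (PySem.List.pyRange 0 n 1).map (fun x => x + 1) = pvRow N 0 := by
    rw [hnN, PySem.List.pyRange_zero_natCast, List.map_map]
    unfold pvRow
    apply List.map_congr_left
    intro j _
    simp [Nat.choose_one_right]
  -- A's outer loop iterates pvInnerA K times
  have houter : (PySem.List.pyRange 0 k 1).foldl (fun l _ => pvInnerA 0 l)
      ((PySem.List.pyRange 0 n 1).map (fun x => x + 1)) = pvRow N K := by
    rw [hinit, pvFoldl_const (pvInnerA 0) (pvRow N 0) (PySem.List.pyRange 0 k 1)]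
    have hlen : (PySem.List.pyRange 0 k 1).length = K := by
      rw [PySem.List.length_pyRange_one]; omega
    rw [hlen, pvIterate_inner]
  rw [houter]
  -- A's result: element N-1 of the row
  have hidx : n - 1 = ((N - 1 : Nat) : Int) := by omega
  have hlt : N - 1 < (pvRow N K).length := by rw [pvRow_length]; omega
  have hA : (PySem.List.pyGet? (pvRow N K) (n - 1)).getD 0
      = ((Nat.choose (N + K) (K + 1) : Nat) : Int) := by
    rw [hidx, PySem.List.pyGet?_natCast]
    rw [List.getElem?_eq_getElem hlt]
    unfold pvRow
    simp only [List.getElem_map, List.getElem_range, Option.getD_some]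
    congr 2
    omega
  rw [hA]
  -- B's loop
  rw [hkk]
  have hm : n + (K : Int) = ((N + K : Nat) : Int) := by push_cast; omega
  have hr : (K : Int) + 1 = ((K + 1 : Nat) : Int) := by push_cast; ring
  rw [hm, hr]
  exact (pvMulLoop (N + K) (K + 1) (by omega)).symm
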